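-- pv_equiv track=rewrite | github.com/I-am-ai-programmer123/AI-hakaton-best | andrzej/warcaby/minimax_algorithm.py | evaluate
-- ===== SOURCE A (Python) =====
-- def evaluate(position):
--     evaluation = 0
--     for row in position:
--         for pawn in row:
--             if pawn == 'w':
--                 evaluation -= 1
--             if pawn == 'W':
--                 evaluation -= 2
--             if pawn == 'b':
--                 evaluation += 1
--             if pawn == 'B':
--                 evaluation += 2
--
--     return evaluation
-- ===== SOURCE B (Python) =====
-- def evaluate(position):
--     pieces = [pawn for row in position for pawn in row]
--     counts = {}
--     for pawn in pieces:
--         counts[pawn] = counts.get(pawn, 0) + 1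
--     return (counts.get('b', 0) + 2 * counts.get('B', 0)
--             - counts.get('w', 0) - 2 * counts.get('W', 0))
-- ===== Notes on version B (the rewrite author's own statement) =====
-- stated objective: idiomatic
-- what changed: B flattens the board, builds a frequency table of piece characters in one counting pass, and computes the score in closed form from the four counts instead of A's per-cell branch-and-accumulate loop.
import Mathlib
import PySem

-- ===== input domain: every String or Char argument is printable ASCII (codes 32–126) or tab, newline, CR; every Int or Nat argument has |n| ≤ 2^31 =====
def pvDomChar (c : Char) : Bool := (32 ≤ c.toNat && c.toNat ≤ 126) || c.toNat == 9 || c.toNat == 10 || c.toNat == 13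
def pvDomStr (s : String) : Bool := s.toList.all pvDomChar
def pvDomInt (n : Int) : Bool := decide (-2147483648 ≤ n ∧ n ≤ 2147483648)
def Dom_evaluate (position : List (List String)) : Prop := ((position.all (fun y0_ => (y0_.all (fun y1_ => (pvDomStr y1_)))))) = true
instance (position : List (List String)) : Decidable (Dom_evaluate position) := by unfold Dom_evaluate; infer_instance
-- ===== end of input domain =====

-- B flattens the board, counts piece characters into a frequency table once, and scores from the four counts; idiomatic table-driven rewrite of A's per-cell branching.


-- ===== PORT A =====
-- per-cell update: four independent ifs, in A's order
def evalStep (acc : Int) (pawn : String) : Int :=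
  let e1 := if pawn = "w" then acc - 1 else acc
  let e2 := if pawn = "W" then e1 - 2 else e1
  let e3 := if pawn = "b" then e2 + 1 else e2
  if pawn = "B" then e3 + 2 else e3

def evaluate (position : List (List String)) : Int :=
  position.foldl (fun acc row => row.foldl evalStep acc) 0

-- ===== PORT B =====
def evaluate_alt (position : List (List String)) : Int :=
  let pieces := position.flatMap (fun row => row)
  let counts := pieces.foldl (fun d pawn => d.insert pawn (d.getD pawn 0 + 1)) PySem.Dict.empty
  counts.getD "b" 0 + 2 * counts.getD "B" 0 - counts.getD "w" 0 - 2 * counts.getD "W" 0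

-- ===== PRECONDITION & SPEC =====
def Spec_evaluate (position : List (List String)) (out : Int) : Prop := out = evaluate_alt position
instance (position : List (List String)) (out : Int) : Decidable (Spec_evaluate position out) := by unfold Spec_evaluate; infer_instance

-- ===== CLAIM (what is proved, stated in full; the proofs are below) =====
def Claim_equal_evaluate : Prop := ∀ (position : List (List String)), Dom_evaluate position → Spec_evaluate position (evaluate position)

-- ===== LEMMAS AND PROOFS =====
-- the score of a list of cells, expressed through counts
def cellScore (cells : List String) : Int :=
  (cells.count "b" : Int) + 2 * (cells.count "B" : Int)
    - (cells.count "w" : Int) - 2 * (cells.count "W" : Int)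

lemma foldl_evalStep (cells : List String) (acc : Int) :
    cells.foldl evalStep acc = acc + cellScore cells := by
  induction cells generalizing acc with
  | nil => simp [cellScore]
  | cons x t ih =>
    simp only [List.foldl_cons, ih, cellScore, List.count_cons]
    simp only [evalStep]
    split_ifs with h1 h2 h3 h4 <;> simp_all <;> ring

lemma evaluate_eq_cellScore (position : List (List String)) :
    evaluate position = cellScore (position.flatMap (fun row => row)) := by
  unfold evaluate
  induction position with
  | nil => simp [cellScore]
  | cons r t ih =>
    simp only [List.foldl_cons, List.flatMap_cons]
    rw [foldl_evalStep]
    have : ∀ (acc : Int) (l : List (List String)),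
        l.foldl (fun acc row => row.foldl evalStep acc) acc
          = acc + l.foldl (fun acc row => row.foldl evalStep acc) 0 := by
      intro acc l
      induction l generalizing acc with
      | nil => simp
      | cons r' t' ih' =>
        simp only [List.foldl_cons]
        rw [ih' (r'.foldl evalStep acc), foldl_evalStep, ih' (r'.foldl evalStep 0), foldl_evalStep]
        ring
    rw [this, ih]
    simp only [cellScore, List.count_append, List.flatMap_id']
    push_cast
    ring

-- ===== VERDICT (by name: the statement is the Claim_ definition above) =====
theorem evaluate_spec : Claim_equal_evaluate := by
  intro position _
  unfold Spec_evaluate evaluate_alt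
  simp only [PySem.Dict.getD_foldl_insert_add_one, PySem.Dict.getD_empty]
  rw [evaluate_eq_cellScore]
  unfold cellScore
  ring
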